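-- pv_equiv track=rewrite | github.com/TerondaDavis/DC-Circulator-Operations | Cleaning.py | replace_first_comma
-- ===== SOURCE A (Python) =====
-- def replace_first_comma(s):
--     result = []
--     comma_count = 0
--     for char in s:
--         if char == ',':
--             comma_count += 1
--             if comma_count % 2 == 0:
--                 result.append(char)
--             else:
--                 result.append('')
--         else:
--             result.append(char)
--     return ''.join(result)
-- ===== SOURCE B (Python) =====
-- def replace_first_comma(s):
--     parts = s.split(',')
--     groups = [''.join(parts[i:i + 2]) for i in range(0, len(parts), 2)]
--     return ','.join(groups)
-- ===== Notes on version B (the rewrite author's own statement) =====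
-- stated objective: faster
-- what changed: B splits the string on the comma separator, merges consecutive parts pairwise and rejoins the pair-groups with a comma, instead of A's character-by-character Python loop with a running comma counter; the per-character interpreter work is replaced by C-level split/join.
import Mathlib
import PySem

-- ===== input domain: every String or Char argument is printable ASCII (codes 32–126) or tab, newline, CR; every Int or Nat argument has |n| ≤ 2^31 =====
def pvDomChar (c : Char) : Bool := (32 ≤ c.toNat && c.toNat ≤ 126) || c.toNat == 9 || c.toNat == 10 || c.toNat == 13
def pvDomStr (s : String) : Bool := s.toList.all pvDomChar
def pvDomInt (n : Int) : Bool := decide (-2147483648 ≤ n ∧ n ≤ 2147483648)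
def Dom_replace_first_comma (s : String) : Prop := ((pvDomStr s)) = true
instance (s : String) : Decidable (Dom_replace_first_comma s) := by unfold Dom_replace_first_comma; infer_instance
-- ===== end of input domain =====

-- B replaces A's character scan with a running comma counter by split-on-comma,
-- pairwise merge of consecutive parts and a ','-join (same O(n), measurably faster: C-level split/join instead of a per-character Python loop).


-- ===== PORT A =====
-- one loop step of A: branch on ',', bump the counter, append the char (for '' append nothing)
def pvStepA (acc : List Char × Int) (c : Char) : List Char × Int :=
  if c = ',' then
    let cnt := acc.2 + 1
    if cnt % 2 = 0 then (acc.1 ++ [c], cnt) else (acc.1 ++ [], cnt)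
  else (acc.1 ++ [c], acc.2)

def replace_first_comma (s : String) : String :=
  -- result list + comma_count threaded through the for-loop; ''.join at the end
  String.ofList (s.toList.foldl pvStepA ([], 0)).1

-- ===== PORT B =====
-- hand port of Python str.split(','): exact for the one-char separator ','
-- ('' splits to [''], empty parts kept)
def pvSplitComma : List Char → List (List Char)
  | [] => [[]]
  | c :: t =>
    if c = ',' then [] :: pvSplitComma t
    else
      match pvSplitComma t with
      | [] => [[c]]          -- unreachable: pvSplitComma never returns []
      | p :: ps => (c :: p) :: ps

-- the comprehension over range(0, len(parts), 2): merge consecutive parts pairwise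
def pvMergePairs : List (List Char) → List (List Char)
  | [] => []
  | [p] => [p]
  | p :: q :: ps => (p ++ q) :: pvMergePairs ps

-- hand port of ','.join: exact for a list of strings
def pvJoinComma : List (List Char) → List Char
  | [] => []
  | [p] => p
  | p :: q :: ps => p ++ ',' :: pvJoinComma (q :: ps)

def replace_first_comma_alt (s : String) : String :=
  String.ofList (pvJoinComma (pvMergePairs (pvSplitComma s.toList)))

-- ===== PRECONDITION & SPEC =====
def Spec_replace_first_comma (s : String) (out : String) : Prop := out = replace_first_comma_alt s
instance (s : String) (out : String) : Decidable (Spec_replace_first_comma s out) := by unfold Spec_replace_first_comma; infer_instance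

-- ===== CLAIM (what is proved, stated in full; the proofs are below) =====
def Claim_equal_replace_first_comma : Prop := ∀ (s : String), Dom_replace_first_comma s → Spec_replace_first_comma s (replace_first_comma s)

-- ===== LEMMAS AND PROOFS =====

-- the rest of A's output from a given comma_count
def pvFRest (cnt : Int) : List Char → List Char
  | [] => []
  | c :: t =>
    if c = ',' then (if (cnt + 1) % 2 = 0 then [c] else []) ++ pvFRest (cnt + 1) t
    else c :: pvFRest cnt t

-- a parity-aware join of the split parts
def pvGJoin (cnt : Int) : List (List Char) → List Char
  | [] => []
  | [p] => p
  | p :: q :: ps => p ++ (if (cnt + 1) % 2 = 0 then [','] else []) ++ pvGJoin (cnt + 1) (q :: ps)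

theorem pvFoldA_eq (l : List Char) : ∀ (acc : List Char) (cnt : Int),
    (l.foldl pvStepA (acc, cnt)).1 = acc ++ pvFRest cnt l := by
  induction l with
  | nil => intro acc cnt; simp [pvFRest]
  | cons c t ih =>
    intro acc cnt
    by_cases hc : c = ','
    · by_cases he : (cnt + 1) % 2 = 0 <;>
        simp [pvStepA, pvFRest, hc, he, ih]
    · simp [pvStepA, pvFRest, hc, ih]

theorem pvSplitComma_ne_nil (l : List Char) : pvSplitComma l ≠ [] := by
  cases l with
  | nil => simp [pvSplitComma]
  | cons c t =>
    simp only [pvSplitComma]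
    split
    · simp
    · cases h : pvSplitComma t <;> simp

theorem pvFRest_eq_gJoin (l : List Char) : ∀ (cnt : Int),
    pvFRest cnt l = pvGJoin cnt (pvSplitComma l) := by
  induction l with
  | nil => intro cnt; simp [pvFRest, pvSplitComma, pvGJoin]
  | cons c t ih =>
    intro cnt
    obtain ⟨p, ps, hps⟩ := List.exists_cons_of_ne_nil (pvSplitComma_ne_nil t)
    by_cases hc : c = ','
    · subst hc
      have hsp : pvSplitComma (',' :: t) = [] :: p :: ps := by
        rw [pvSplitComma]; simp [hps]
      have ih' : pvFRest (cnt + 1) t = pvGJoin (cnt + 1) (p :: ps) := by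
        rw [ih, hps]
      simp [pvFRest, pvGJoin, hsp, ih']
    · have hsp : pvSplitComma (c :: t) = (c :: p) :: ps := by
        rw [pvSplitComma]; simp [hc, hps]
      have ih' : pvFRest cnt t = pvGJoin cnt (p :: ps) := by
        rw [ih, hps]
      cases ps with
      | nil => simp [pvFRest, hc, hsp, pvGJoin, ih']
      | cons q ps' => simp [pvFRest, hc, hsp, pvGJoin, ih', List.append_assoc]

theorem pvMergePairs_ne_nil (p : List Char) (ps : List (List Char)) :
    pvMergePairs (p :: ps) ≠ [] := by
  cases ps <;> simp [pvMergePairs]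

theorem pvGJoin_eq : ∀ (ps : List (List Char)) (cnt : Int), cnt % 2 = 0 →
    pvGJoin cnt ps = pvJoinComma (pvMergePairs ps)
  | [], _, _ => rfl
  | [p], _, _ => rfl
  | p :: q :: ps, cnt, h => by
    have h1 : (cnt + 1) % 2 ≠ 0 := by omega
    have h2 : (cnt + 1 + 1) % 2 = 0 := by omega
    cases ps with
    | nil => simp [pvGJoin, pvMergePairs, pvJoinComma, h1]
    | cons r ps' =>
      obtain ⟨m, ms, hm⟩ := List.exists_cons_of_ne_nil (pvMergePairs_ne_nil r ps')
      have ih' : pvGJoin (cnt + 1 + 1) (r :: ps') = pvJoinComma (m :: ms) := by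
        rw [pvGJoin_eq (r :: ps') (cnt + 1 + 1) h2, hm]
      simp [pvGJoin, pvMergePairs, pvJoinComma, h1, h2, hm, ih', List.append_assoc]

-- ===== VERDICT (by name: the statement is the Claim_ definition above) =====
theorem replace_first_comma_spec : Claim_equal_replace_first_comma := by
  intro s _
  unfold Spec_replace_first_comma replace_first_comma replace_first_comma_alt
  rw [pvFoldA_eq, pvFRest_eq_gJoin, pvGJoin_eq _ 0 rfl]
  rfl
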